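-- pv_equiv track=rewrite | github.com/huypn12/bayes-bees | impl/models/prism_utils/prism_dtmc_parser.py | replace_select_op
-- ===== SOURCE A (Python) =====
-- def replace_select_op(a_gcmd_str):
--     # Replace '+' as successor state separation by '$' for easier parsing
--     # since '+' is also used in symbolic expression
--     gcmd_str = a_gcmd_str
--     gcmd_str_end = len(gcmd_str) - 1
--     i = 0
--     while i <= gcmd_str_end:
--         if gcmd_str[i] == ':':
--             j = 1
--             while i + j <= gcmd_str_end:
--                 if gcmd_str[i + j] == "+":
--                     gcmd_str = gcmd_str[:i + j] + \
--                         "$" + gcmd_str[i + j + 1:]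
--                     i += j
--                     break
--                 j += 1
--         i += 1
--     return gcmd_str
-- ===== SOURCE B (Python) =====
-- def replace_select_op(a_gcmd_str):
--     # One-pass state machine: a boolean waiting flag is set by a colon and the
--     # next plus sign seen while waiting is emitted as a dollar sign (clearing it).
--     out = []
--     waiting = False
--     for ch in a_gcmd_str:
--         if waiting and ch == '+':
--             out.append('$')
--             waiting = False
--         else:
--             out.append(ch)
--             waiting = waiting or ch == ':'
--     return ''.join(out)
-- ===== Notes on version B (the rewrite author's own statement) =====
-- stated objective: alternative
-- what changed: A repeatedly rescans for the plus sign following each colon and rebuilds the whole string by slicing at every replacement; B is a one-pass finite-state machine over the characters (a boolean waiting flag set by a colon and cleared by the plus sign it rewrites to a dollar sign), appending to a list and joining once.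
import Mathlib
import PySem

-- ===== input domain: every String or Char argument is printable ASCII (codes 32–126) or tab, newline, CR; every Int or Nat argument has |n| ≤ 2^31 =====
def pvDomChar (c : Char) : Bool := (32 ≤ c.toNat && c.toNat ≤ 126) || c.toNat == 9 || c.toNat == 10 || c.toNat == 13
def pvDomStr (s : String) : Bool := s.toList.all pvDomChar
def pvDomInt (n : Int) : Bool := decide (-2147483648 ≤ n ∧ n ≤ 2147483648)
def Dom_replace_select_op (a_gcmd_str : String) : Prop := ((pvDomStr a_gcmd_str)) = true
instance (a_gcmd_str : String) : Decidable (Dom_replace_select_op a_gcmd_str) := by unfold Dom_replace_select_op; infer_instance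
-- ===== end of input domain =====

-- B replaces A's rescan-and-reslice with a one-pass state machine (a waiting flag set by
-- a colon, cleared by the plus sign it rewrites to a dollar sign): objective = alternative.

-- ===== PORT A =====
-- A's inner while loop: starting at offset j from i, scan for the first '+';
-- Python's `i + j <= gcmd_str_end` (end = len-1) is `i + j < length` on Nat indices.
def pvInnerA (s : List Char) (i j : Nat) : Option Nat :=
  if h : i + j < s.length then
    if s[i + j] = '+' then some (i + j)
    else pvInnerA s i (j + 1)
  else none
termination_by s.length - (i + j)

-- bounds of the inner search result, needed for pvOuterA's termination
theorem pvInnerA_some_bounds (s : List Char) (i j p : Nat)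
    (h : pvInnerA s i j = some p) : i + j ≤ p ∧ p < s.length := by
  fun_induction pvInnerA s i j with
  | case1 a b c => simp at h; omega
  | case2 a b c ih => have := ih h; omega
  | case3 => simp at h

-- A's outer while loop over the (possibly already modified) string; the replacement
-- `gcmd_str[:p] + "$" + gcmd_str[p+1:]` is `s.take p ++ '$' :: s.drop (p+1)` (exact for 0 ≤ p < len);
-- after a replacement at p, Python's `i += j` followed by `i += 1` resumes at p+1.
def pvOuterA (s : List Char) (i : Nat) : List Char :=
  if h : i < s.length then
    if s[i] = ':' then
      match hp : pvInnerA s i 1 with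
      | some p => pvOuterA (s.take p ++ '$' :: s.drop (p + 1)) (p + 1)
      | none => pvOuterA s (i + 1)
    else pvOuterA s (i + 1)
  else s
termination_by s.length - i
decreasing_by
  · have := pvInnerA_some_bounds s i 1 p hp
    simp [List.length_take, List.length_drop]
    omega
  · omega
  · omega

def replace_select_op (a_gcmd_str : String) : String :=
  String.ofList (pvOuterA a_gcmd_str.toList 0)

-- ===== PORT B =====
-- B's single for-loop with the boolean 'waiting' and the output list, char by char
def pvScanB (l : List Char) (w : Bool) : List Char :=
  match l with
  | [] => []
  | c :: rest =>
    if w && c == '+' then '$' :: pvScanB rest false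
    else c :: pvScanB rest (w || c == ':')

def replace_select_op_alt (a_gcmd_str : String) : String :=
  String.ofList (pvScanB a_gcmd_str.toList false)

-- ===== PRECONDITION & SPEC =====
def Spec_replace_select_op (a_gcmd_str : String) (out : String) : Prop := out = replace_select_op_alt a_gcmd_str
instance (a_gcmd_str : String) (out : String) : Decidable (Spec_replace_select_op a_gcmd_str out) := by unfold Spec_replace_select_op; infer_instance

-- ===== CLAIM (what is proved, stated in full; the proofs are below) =====
def Claim_equal_replace_select_op : Prop := ∀ (a_gcmd_str : String), Dom_replace_select_op a_gcmd_str → Spec_replace_select_op a_gcmd_str (replace_select_op a_gcmd_str)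

-- ===== LEMMAS AND PROOFS =====

-- generic find-from, characterising A's inner scan
def pvFindFrom (s : List Char) (c : Char) (m : Nat) : Option Nat :=
  if h : m < s.length then
    if s[m] = c then some m else pvFindFrom s c (m + 1)
  else none
termination_by s.length - m

theorem pvFindFrom_some_bounds (s : List Char) (c : Char) (m k : Nat)
    (h : pvFindFrom s c m = some k) : m ≤ k ∧ k < s.length := by
  fun_induction pvFindFrom s c m with
  | case1 a hlt heq => simp at h; omega
  | case2 a hlt hne ih => have := ih h; omega
  | case3 => simp at h

theorem pvFindFrom_some_spec (s : List Char) (c : Char) (m k : Nat)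
    (h : pvFindFrom s c m = some k) : s[k]? = some c := by
  fun_induction pvFindFrom s c m with
  | case1 a hlt heq =>
    simp only [Option.some.injEq] at h
    subst h
    simp [List.getElem?_eq_getElem hlt, heq]
  | case2 a hlt hne ih => exact ih h
  | case3 => simp at h

theorem pvFindFrom_some_first (s : List Char) (c : Char) (m k : Nat)
    (h : pvFindFrom s c m = some k) :
    ∀ t, m ≤ t → t < k → ¬ s[t]? = some c := by
  fun_induction pvFindFrom s c m with
  | case1 a hlt heq =>
    simp only [Option.some.injEq] at h
    subst h
    intro t ht htl
    omega
  | case2 a hlt hne ih =>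
    intro t ht htk
    rcases Nat.eq_or_lt_of_le ht with rfl | hlt'
    · simp [List.getElem?_eq_getElem hlt]
      exact hne
    · exact ih h t hlt' htk
  | case3 => simp at h

theorem pvFindFrom_none_iff (s : List Char) (c : Char) (m : Nat) :
    pvFindFrom s c m = none ↔ ∀ t, m ≤ t → t < s.length → ¬ s[t]? = some c := by
  fun_induction pvFindFrom s c m with
  | case1 a hlt heq =>
    constructor
    · intro h; simp at h
    · intro h
      exact ((h a le_rfl hlt) (by simp [List.getElem?_eq_getElem hlt, heq])).elim
  | case2 a hlt hne ih =>
    rw [ih]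
    constructor
    · intro h t ht htl
      rcases Nat.eq_or_lt_of_le ht with rfl | hlt'
      · simp [List.getElem?_eq_getElem htl]
        exact hne
      · exact h t hlt' htl
    · intro h t ht htl
      exact h t (by omega) htl
  | case3 a hge =>
    constructor
    · intro _ t ht htl; omega
    · intro _; rfl

-- one-step unfoldings of find-from
theorem pvFindFrom_step_eq (s : List Char) (c : Char) (m : Nat)
    (hm : m < s.length) (heq : s[m] = c) : pvFindFrom s c m = some m := by
  rw [pvFindFrom]; simp [hm, heq]

theorem pvFindFrom_step_ne (s : List Char) (c : Char) (m : Nat)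
    (hm : m < s.length) (hne : ¬ s[m] = c) :
    pvFindFrom s c m = pvFindFrom s c (m + 1) := by
  rw [pvFindFrom]; simp [hm, hne]

-- A's inner scan is exactly find-'+'-from i+j
theorem pvInnerA_eq_find (s : List Char) (i j : Nat) :
    pvInnerA s i j = pvFindFrom s '+' (i + j) := by
  fun_induction pvInnerA s i j with
  | case1 a hlt heq => rw [pvFindFrom_step_eq s '+' (i + a) hlt heq]
  | case2 a hlt hne ih =>
    rw [ih, pvFindFrom_step_ne s '+' (i + a) hlt hne, Nat.add_assoc]
  | case3 a hge => rw [pvFindFrom]; simp [hge]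

-- when no '+' occurs, the scanner copies the input for either flag value
theorem pvScanB_noplus (l : List Char) (w : Bool) (h : '+' ∉ l) :
    pvScanB l w = l := by
  induction l generalizing w with
  | nil => rfl
  | cons c rest ih =>
    simp only [List.mem_cons, not_or] at h
    rw [pvScanB]
    have : (c == '+') = false := by
      simp; exact fun hc => h.1 hc.symm
    simp [this, ih _ h.2]

-- with the flag set, the scanner copies any '+'-free prefix and keeps the flag
theorem pvScanB_copy (mid rest : List Char) (h : '+' ∉ mid) :
    pvScanB (mid ++ rest) true = mid ++ pvScanB rest true := by
  induction mid with
  | nil => rfl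
  | cons c m ih =>
    simp only [List.mem_cons, not_or] at h
    rw [List.cons_append, pvScanB]
    have : (c == '+') = false := by
      simp; exact fun hc => h.1 hc.symm
    simp [this, ih h.2]

-- main invariant: A's loop from position i yields the untouched prefix followed by
-- the state machine run (flag off) over the suffix
theorem pvMain (n : Nat) : ∀ (s : List Char) (i : Nat), s.length - i ≤ n →
    pvOuterA s i = s.take i ++ pvScanB (s.drop i) false := by
  induction n with
  | zero =>
    intro s i hn
    have hi : ¬ i < s.length := by omega
    rw [pvOuterA, dif_neg hi, List.drop_eq_nil_of_le (by omega)]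
    simp [pvScanB, List.take_of_length_le (by omega : s.length ≤ i)]
  | succ n ih =>
    intro s i hn
    by_cases hi : i < s.length
    · have hdrop : s.drop i = s[i] :: s.drop (i + 1) :=
        List.drop_eq_getElem_cons hi
      have htake : s.take (i + 1) = s.take i ++ [s[i]] := by
        rw [List.take_succ, List.getElem?_eq_getElem hi]; rfl
      by_cases hc : s[i] = ':'
      · have e1 : pvScanB (s[i] :: s.drop (i + 1)) false
            = ':' :: pvScanB (s.drop (i + 1)) true := by
          rw [pvScanB]; simp [hc]
        rw [pvOuterA, dif_pos hi, if_pos hc]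
        cases hfp : pvFindFrom s '+' (i + 1) with
        | none =>
          rw [show (match hp : pvInnerA s i 1 with
              | some p => pvOuterA (s.take p ++ '$' :: s.drop (p + 1)) (p + 1)
              | none => pvOuterA s (i + 1)) = pvOuterA s (i + 1) by
            rw [pvInnerA_eq_find, hfp]]
          -- no '+' after the ':': neither side changes anything further
          have hnop : '+' ∉ s.drop (i + 1) := by
            intro hmem
            obtain ⟨t, htl, hte⟩ := List.mem_iff_getElem.mp hmem
            rw [List.getElem_drop] at hte
            have hgl : i + 1 + t < s.length := by simp at htl; omega
            refine (pvFindFrom_none_iff s '+' (i + 1)).mp hfp (i + 1 + t)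
              (by omega) hgl ?_
            rw [List.getElem?_eq_getElem hgl, hte]
          rw [ih s (i + 1) (by omega), hdrop, htake, e1,
            pvScanB_noplus _ _ hnop, pvScanB_noplus _ _ hnop]
          simp
          rw [← hc, ← hdrop, List.take_append_drop]
        | some p =>
          rw [show (match hp : pvInnerA s i 1 with
              | some q => pvOuterA (s.take q ++ '$' :: s.drop (q + 1)) (q + 1)
              | none => pvOuterA s (i + 1))
              = pvOuterA (s.take p ++ '$' :: s.drop (p + 1)) (p + 1) by
            rw [pvInnerA_eq_find, hfp]]
          obtain ⟨hip, hpl⟩ := pvFindFrom_some_bounds s '+' (i + 1) p hfp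
          have hsp : s[p] = '+' := by
            have := pvFindFrom_some_spec s '+' (i + 1) p hfp
            rwa [List.getElem?_eq_getElem hpl, Option.some.injEq] at this
          -- mid: the '+'-free stretch strictly between the ':' and the '+'
          set mid := (s.drop (i + 1)).take (p - (i + 1)) with hmid
          have hmidlen : mid.length = p - (i + 1) := by
            simp [hmid]; omega
          have hnop : '+' ∉ mid := by
            intro hmem
            obtain ⟨t, htl, hte⟩ := List.mem_iff_getElem.mp hmem
            rw [hmidlen] at htl
            have hgl : i + 1 + t < s.length := by omega
            have hte2 : s[i + 1 + t]'hgl = '+' := by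
              rw [← hte]
              simp [hmid, List.getElem_take, List.getElem_drop]
            refine pvFindFrom_some_first s '+' (i + 1) p hfp (i + 1 + t)
              (by omega) (by omega) ?_
            rw [List.getElem?_eq_getElem hgl, hte2]
          -- decompositions around p
          have h3 : s.drop p = '+' :: s.drop (p + 1) := by
            rw [List.drop_eq_getElem_cons hpl, hsp]
          have hdp : s.drop (i + 1) = mid ++ '+' :: s.drop (p + 1) := by
            have h1 : s.drop (i + 1)
                = mid ++ (s.drop (i + 1)).drop (p - (i + 1)) :=
              (List.take_append_drop _ _).symm
            have h2 : (s.drop (i + 1)).drop (p - (i + 1)) = s.drop p := by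
              rw [List.drop_drop]; congr 1; omega
            rw [h1, h2, h3]
          have htp : s.take p = s.take i ++ s[i] :: mid :=
            calc s.take p = s.take ((i + 1) + (p - (i + 1))) := by congr 1; omega
              _ = s.take (i + 1) ++ (s.drop (i + 1)).take (p - (i + 1)) :=
                List.take_add
              _ = s.take i ++ s[i] :: mid := by
                rw [htake, ← hmid, List.append_assoc]; rfl
          -- left side: recurse on the edited string from p+1
          rw [ih (s.take p ++ '$' :: s.drop (p + 1)) (p + 1)
            (by simp; omega)]
          have hlp : (s.take p).length = p := by simp [hpl.le]
          have hT : (s.take p ++ '$' :: s.drop (p + 1)).take (p + 1)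
              = s.take p ++ ['$'] := by
            rw [show p + 1 = (s.take p).length + 1 by rw [hlp]]
            rw [List.take_length_add_append]
            rfl
          have hD : (s.take p ++ '$' :: s.drop (p + 1)).drop (p + 1)
              = s.drop (p + 1) := by
            rw [show p + 1 = (s.take p).length + 1 by rw [hlp]]
            rw [List.drop_length_add_append]
            rfl
          rw [hT, hD, htp]
          -- right side: run the machine through ':', mid, '+'
          rw [hdrop, e1, hdp, pvScanB_copy _ _ hnop, pvScanB]
          simp
          exact hc
      · rw [pvOuterA, dif_pos hi, if_neg hc]
        rw [ih s (i + 1) (by omega), hdrop, htake, pvScanB]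
        have h1 : (s[i] == ':') = false := by
          simp; exact hc
        simp only [Bool.false_and, if_neg Bool.false_ne_true, h1, Bool.false_or]
        rw [List.append_assoc]
        rfl
    · rw [pvOuterA, dif_neg hi, List.drop_eq_nil_of_le (by omega)]
      simp [pvScanB, List.take_of_length_le (by omega : s.length ≤ i)]

-- ===== VERDICT (by name: the statement is the Claim_ definition above) =====
theorem replace_select_op_spec : Claim_equal_replace_select_op := by
  intro a _
  unfold Spec_replace_select_op replace_select_op replace_select_op_alt
  congr 1
  exact (pvMain a.toList.length a.toList 0 (by omega)).trans (by simp)
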